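-- pv_equiv track=rewrite | github.com/Looyyd/Signal-protocol-python | crypto/SHA3_512.py | rc
-- ===== SOURCE A (Python) =====
-- def rc(t):
--     if t%255 == 0:
--         return 1
--     else:
--         R=[1,0,0,0,0,0,0,0]
--         for i in range(0,t%255):
--             R.insert(0,0)
--             R[0]=(R[0]+R[8]) % 2
--             R[4]=(R[4]+R[8]) % 2
--             R[5]=(R[5]+R[8]) % 2
--             R[6]=(R[6]+R[8]) % 2
--             R= R[0:8]
--         return R[0]
-- ===== SOURCE B (Python) =====
-- def rc(t):
--     # rc(t) is the constant coefficient of x^(t%255) in GF(2)[x]/(x^8+x^6+x^5+x^4+1):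
--     # computed by square-and-multiply exponentiation instead of stepping the LFSR.
--     def mulmod(a, b):
--         # carry-less product of a and b reduced mod 0x171 (both < 256)
--         r = 0
--         for _ in range(8):
--             if b & 1:
--                 r ^= a
--             b >>= 1
--             a <<= 1
--             if a & 0x100:
--                 a ^= 0x171
--         return r
--
--     e = t % 255
--     r, base = 1, 2          # base = x
--     for _ in range(8):      # e < 255 < 2**8
--         if e & 1:
--             r = mulmod(r, base)
--         base = mulmod(base, base)
--         e >>= 1
--     return r & 1
-- ===== Notes on version B (the rewrite author's own statement) =====
-- stated objective: alternative
-- what changed: Instead of stepping the 8-bit LFSR t%255 times on a list, B computes the same bit algebraically as the constant coefficient of x^(t%255) in GF(2)[x]/(x^8+x^6+x^5+x^4+1) via square-and-multiply exponentiation with a carry-less modular multiply (fixed 8 squarings/multiplies of 8 steps each).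
import Mathlib
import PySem

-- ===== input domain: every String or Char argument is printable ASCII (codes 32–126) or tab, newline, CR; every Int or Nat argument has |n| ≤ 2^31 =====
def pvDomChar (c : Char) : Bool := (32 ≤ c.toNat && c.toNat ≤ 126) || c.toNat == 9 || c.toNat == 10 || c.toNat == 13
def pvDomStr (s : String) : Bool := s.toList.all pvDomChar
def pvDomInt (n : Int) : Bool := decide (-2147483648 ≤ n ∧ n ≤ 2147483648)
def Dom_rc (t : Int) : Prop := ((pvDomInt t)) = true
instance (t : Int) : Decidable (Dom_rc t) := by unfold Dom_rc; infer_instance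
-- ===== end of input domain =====

-- B computes the same round-constant bit algebraically — the constant coefficient of
-- x^(t%255) in GF(2)[x]/(x^8+x^6+x^5+x^4+1) via square-and-multiply — instead of
-- stepping the LFSR t%255 times (alternative algorithm, iteration-count independent).

-- ===== PORT A =====
-- one iteration of A's loop body: insert 0 at front, xor R[8] into 0,4,5,6, truncate to 8
def rcStep (R0 : List Int) : List Int :=
  let R1 := (0 : Int) :: R0
  let R2 := R1.set 0 (PySem.Int.mod (R1.getD 0 0 + R1.getD 8 0) 2)
  let R3 := R2.set 4 (PySem.Int.mod (R2.getD 4 0 + R2.getD 8 0) 2)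
  let R4 := R3.set 5 (PySem.Int.mod (R3.getD 5 0 + R3.getD 8 0) 2)
  let R5 := R4.set 6 (PySem.Int.mod (R4.getD 6 0 + R4.getD 8 0) 2)
  PySem.List.slice R5 (some 0) (some 8)

def rc (t : Int) : Int :=
  if PySem.Int.mod t 255 = 0 then 1
  else
    let R := (PySem.List.pyRange 0 (PySem.Int.mod t 255) 1).foldl
      (fun R _ => rcStep R) [1, 0, 0, 0, 0, 0, 0, 0]
    R.getD 0 0

-- ===== PORT B =====
-- carry-less product of a and b reduced mod 0x171 (inputs < 256); Source B's mulmod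
def rcMulmod (a b : Int) : Int :=
  (((List.range 8).foldl
    (fun (s : Int × Int × Int) _ =>
      let (r, b, a) := s
      let r := if PySem.Int.band b 1 ≠ 0 then PySem.Int.bxor r a else r
      let b := b >>> (1 : Nat)
      let a := a <<< (1 : Nat)
      let a := if PySem.Int.band a 256 ≠ 0 then PySem.Int.bxor a 369 else a
      (r, b, a))
    (0, b, a))).1

-- square-and-multiply exponentiation: x^(t%255) mod x^8+x^6+x^5+x^4+1, low coefficient
def rc_alt (t : Int) : Int :=
  let e := PySem.Int.mod t 255
  let rb := (List.range 8).foldl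
    (fun (s : Int × Int × Int) _ =>
      let (r, base, e) := s
      let r := if PySem.Int.band e 1 ≠ 0 then rcMulmod r base else r
      let base := rcMulmod base base
      let e := e >>> (1 : Nat)
      (r, base, e))
    (1, 2, e)
  PySem.Int.band rb.1 1

-- ===== PRECONDITION & SPEC =====
def Spec_rc (t : Int) (out : Int) : Prop := out = rc_alt t
instance (t : Int) (out : Int) : Decidable (Spec_rc t out) := by unfold Spec_rc; infer_instance

-- ===== CLAIM (what is proved, stated in full; the proofs are below) =====
def Claim_equal_rc : Prop := ∀ (t : Int), Dom_rc t → Spec_rc t (rc t)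

-- ===== LEMMAS AND PROOFS =====

-- both ports depend on t only through m = t % 255 ∈ [0, 255); gA/gB are their bodies
def gA (m : Int) : Int :=
  if m = 0 then 1
  else ((PySem.List.pyRange 0 m 1).foldl (fun R _ => rcStep R) [1, 0, 0, 0, 0, 0, 0, 0]).getD 0 0

def gB (m : Int) : Int :=
  PySem.Int.band ((List.range 8).foldl
    (fun (s : Int × Int × Int) _ =>
      let (r, base, e) := s
      let r := if PySem.Int.band e 1 ≠ 0 then rcMulmod r base else r
      let base := rcMulmod base base
      let e := e >>> (1 : Nat)
      (r, base, e))
    (1, 2, m)).1 1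

theorem rc_eq_gA (t : Int) : rc t = gA (PySem.Int.mod t 255) := rfl
theorem rc_alt_eq_gB (t : Int) : rc_alt t = gB (PySem.Int.mod t 255) := rfl

set_option maxRecDepth 100000 in
theorem gA_eq_gB : ∀ m : Fin 255, gA (Int.ofNat m.val) = gB (Int.ofNat m.val) := by decide

-- ===== VERDICT (by name: the statement is the Claim_ definition above) =====
theorem rc_spec : Claim_equal_rc := by
  intro t _
  unfold Spec_rc
  rw [rc_eq_gA, rc_alt_eq_gB]
  have h0 : (0 : Int) ≤ PySem.Int.mod t 255 := PySem.Int.mod_nonneg _ (by norm_num)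
  have h1 : PySem.Int.mod t 255 < 255 := PySem.Int.mod_lt _ (by norm_num)
  have hm : PySem.Int.mod t 255 = Int.ofNat (PySem.Int.mod t 255).toNat := (Int.toNat_of_nonneg h0).symm
  rw [hm]
  exact gA_eq_gB ⟨(PySem.Int.mod t 255).toNat, by omega⟩
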